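-- pv_equiv track=rewrite | github.com/still-zachary-gibson/someEulerCodeStuff | problem18/traingle route - Copy (2).py | triangle_to_index
-- ===== SOURCE A (Python) =====
-- def triangle_to_index(y, x):
--     index = 0
--     if x > y:
--         x = y
--     while y > 0:
--         index += y
--         y -= 1
--     index += x
--     return index
-- ===== SOURCE B (Python) =====
-- def triangle_to_index(y, x):
--     return max(y, 0) * (y + 1) // 2 + min(x, y)
-- ===== Notes on version B (the rewrite author's own statement) =====
-- stated objective: faster
-- what changed: Replaced the O(y) decrement loop summing y+(y-1)+...+1 by the closed form max(y,0)*(y+1)//2, and the clamp branch by min(x,y).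
import Mathlib
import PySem

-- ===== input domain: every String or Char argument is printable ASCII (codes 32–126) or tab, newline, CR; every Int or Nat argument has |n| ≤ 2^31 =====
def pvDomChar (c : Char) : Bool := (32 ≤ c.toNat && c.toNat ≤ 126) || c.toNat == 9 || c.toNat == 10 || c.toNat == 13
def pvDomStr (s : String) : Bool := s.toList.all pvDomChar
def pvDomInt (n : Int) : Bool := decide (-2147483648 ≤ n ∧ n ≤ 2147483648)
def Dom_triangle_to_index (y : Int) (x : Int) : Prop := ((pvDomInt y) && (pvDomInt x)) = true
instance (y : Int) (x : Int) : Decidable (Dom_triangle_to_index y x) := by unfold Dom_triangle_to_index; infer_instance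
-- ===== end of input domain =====

-- B replaces A's O(y) decrement loop by the closed form max(y,0)*(y+1)//2 + min(x,y) (O(1)).


-- ===== PORT A =====
-- the 'while y > 0: index += y; y -= 1' loop, step for step
def triangleLoopA (index : Int) (y : Int) : Int :=
  if y > 0 then triangleLoopA (index + y) (y - 1) else index
termination_by y.toNat
decreasing_by omega

def triangle_to_index (y : Int) (x : Int) : Int :=
  let x' := if x > y then y else x
  triangleLoopA 0 y + x'

-- ===== PORT B =====
def triangle_to_index_alt (y : Int) (x : Int) : Int :=
  PySem.Int.floordiv (max y 0 * (y + 1)) 2 + min x y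

-- ===== PRECONDITION & SPEC =====
def Spec_triangle_to_index (y : Int) (x : Int) (out : Int) : Prop := out = triangle_to_index_alt y x
instance (y : Int) (x : Int) (out : Int) : Decidable (Spec_triangle_to_index y x out) := by unfold Spec_triangle_to_index; infer_instance

-- ===== CLAIM (what is proved, stated in full; the proofs are below) =====
def Claim_equal_triangle_to_index : Prop := ∀ (y : Int) (x : Int), Dom_triangle_to_index y x → Spec_triangle_to_index y x (triangle_to_index y x)

-- ===== LEMMAS AND PROOFS =====
theorem triangleLoopA_eq (n : Nat) : ∀ (i y : Int), y.toNat = n →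
    triangleLoopA i y = i + PySem.Int.floordiv (max y 0 * (y + 1)) 2 := by
  induction n with
  | zero =>
    intro i y h
    have hy : y ≤ 0 := by omega
    rw [triangleLoopA]
    have hmax : max y 0 = 0 := by omega
    simp [hy, PySem.Int.floordiv, hmax]
  | succ n ih =>
    intro i y h
    have hy : y > 0 := by omega
    rw [triangleLoopA]
    simp only [hy, if_true]
    rw [ih (i + y) (y - 1) (by omega)]
    have h1 : max y 0 = y := by omega
    have h2 : max (y - 1) 0 = y - 1 := by omega
    rw [h1, h2]
    have e1 : y * (y + 1) = (y - 1) * (y - 1 + 1) + y * 2 := by ring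
    simp only [PySem.Int.floordiv]
    rw [e1, Int.add_mul_fdiv_right _ _ (by norm_num : (2:Int) ≠ 0)]
    ring

-- ===== VERDICT (by name: the statement is the Claim_ definition above) =====
theorem triangle_to_index_spec : Claim_equal_triangle_to_index := by
  intro y x _
  unfold Spec_triangle_to_index triangle_to_index triangle_to_index_alt
  rw [triangleLoopA_eq y.toNat 0 y rfl]
  have : (if x > y then y else x) = min x y := by
    split <;> omega
  rw [this]; ring
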